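-- pv_equiv track=rewrite | github.com/Lightslayr/PyHTML | parser.py | read_until_tag
-- ===== SOURCE A (Python) =====
-- def is_tag(pos, html_text):
--     if pos + 1 >= len(html_text):  # Check if next char exists
--         return False
--     next_char = html_text[pos + 1]
--     return(
--         next_char.isalpha() or  # <div
--         next_char == '/' or     # </div
--         next_char == '!' or     # <!-- or <!DOCTYPE
--         next_char == '?'        # <?xml
--     )
--
-- def read_until_tag(pos, html_text, tag):
--     content = ""
--     while pos < len(html_text):
--         if html_text[pos] == '<' and is_tag(pos, html_text):
--             break
--         content += html_text[pos]
--
--         pos += 1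
--     glyph = " glyph="
--     glyph += content.strip()
--     tag += glyph
--
--     return html_text, pos + len(glyph), tag
-- ===== SOURCE B (Python) =====
-- def is_tag(pos, html_text):
--     if pos + 1 >= len(html_text):  # Check if next char exists
--         return False
--     next_char = html_text[pos + 1]
--     return(
--         next_char.isalpha() or  # <div
--         next_char == '/' or     # </div
--         next_char == '!' or     # <!-- or <!DOCTYPE
--         next_char == '?'        # <?xml
--     )
--
-- def read_until_tag(pos, html_text, tag):
--     # Jump between '<' candidates with str.find instead of scanning char by char,
--     # then take the content as one slice.
--     stop = pos
--     while stop < len(html_text):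
--         i = html_text.find('<', stop)
--         if i == -1:
--             stop = len(html_text)
--             break
--         if is_tag(i, html_text):
--             stop = i
--             break
--         stop = i + 1
--     glyph = " glyph=" + html_text[pos:stop].strip()
--     tag += glyph
--     return html_text, stop + len(glyph), tag
-- ===== Notes on version B (the rewrite author's own statement) =====
-- stated objective: faster
-- what changed: replaces A's per-character scan that accumulates content one char at a time with str.find jumps from one '<' candidate to the next plus a single slice of the text
-- intended difference: For -len(html_text) <= pos < 0, A's per-index loop reads characters through Python's negative-index wraparound, so its content duplicates end-of-string characters (and it may even break at a negative index), skewing the returned index and tag; B uses the plain slice html_text[pos:stop], the intended reading of 'text from pos to the next tag'. — e.g. on read_until_tag(-1, "ab", "t"): A returns ("ab", 12, "t glyph=bab"), B returns ("ab", 10, "t glyph=b")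
import Mathlib
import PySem

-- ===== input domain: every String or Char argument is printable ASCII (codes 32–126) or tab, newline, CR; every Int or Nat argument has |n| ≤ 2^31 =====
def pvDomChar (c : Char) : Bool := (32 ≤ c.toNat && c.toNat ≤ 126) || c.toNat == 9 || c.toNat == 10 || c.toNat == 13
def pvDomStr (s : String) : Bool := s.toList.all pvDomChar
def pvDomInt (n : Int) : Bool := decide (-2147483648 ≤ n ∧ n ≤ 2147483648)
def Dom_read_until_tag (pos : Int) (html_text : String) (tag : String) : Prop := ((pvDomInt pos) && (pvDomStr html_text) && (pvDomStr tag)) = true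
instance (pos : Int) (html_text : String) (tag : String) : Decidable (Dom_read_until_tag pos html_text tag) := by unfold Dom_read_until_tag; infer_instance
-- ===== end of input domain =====

-- B replaces A's per-character accumulation loop with str.find jumps between '<'
-- candidates and one slice of the text (objective: faster by a constant factor).

-- ===== PORT A =====
-- helper is_tag (identical in Source A and Source B; shared by both ports)
def pyIsTag (pos : Int) (s : String) : Bool :=
  if PySem.Str.len s ≤ pos + 1 then false
  else
    match PySem.Str.pyGet? s (pos + 1) with
    | none => false   -- Python would raise here; unreachable for the indices both loops pass
    | some c => PySem.Chars.isalpha c || c == '/' || c == '!' || c == '?'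

-- A's while-loop: walk index by index, accumulating content char by char.
-- (fuel only makes the recursion structural; (len - pos).toNat + 1 steps always suffice)
def pyLoopA (s : String) : Nat → Int → List Char → List Char × Int
  | 0, pos, content => (content, pos)
  | fuel + 1, pos, content =>
    if pos < PySem.Str.len s then
      match PySem.Str.pyGet? s pos with
      | none => (content, pos)   -- IndexError in Python (pos < -len); excluded by Pre_
      | some ch =>
        if ch == '<' && pyIsTag pos s then (content, pos)
        else pyLoopA s fuel (pos + 1) (content ++ [ch])
    else (content, pos)

def read_until_tag (pos : Int) (html_text : String) (tag : String) : String × Int × String :=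
  let r := pyLoopA html_text ((PySem.Str.len html_text - pos).toNat + 1) pos []
  let glyph : List Char := (" glyph=").toList ++ PySem.Chars.strip r.1
  (html_text, r.2 + (glyph.length : Int), String.ofList (tag.toList ++ glyph))

-- ===== PORT B =====
-- B's while-loop: jump straight to the next '<' with str.find.
-- (fuel only makes the recursion structural; stop grows by at least 1 per round)
def pyFindStopB (s : String) : Nat → Int → Int
  | 0, stop => stop
  | fuel + 1, stop =>
    if stop < PySem.Str.len s then
      let i := PySem.Str.findFrom s "<" stop none
      if i = -1 then PySem.Str.len s
      else if pyIsTag i s then i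
      else pyFindStopB s fuel (i + 1)
    else stop

def read_until_tag_alt (pos : Int) (html_text : String) (tag : String) : String × Int × String :=
  let stop := pyFindStopB html_text ((PySem.Str.len html_text - pos).toNat + 1) pos
  let glyph : List Char :=
    (" glyph=").toList ++ PySem.Chars.strip (PySem.Str.slice html_text (some pos) (some stop)).toList
  (html_text, stop + (glyph.length : Int), String.ofList (tag.toList ++ glyph))

-- ===== PRECONDITION & SPEC =====
-- Pre_ excludes exactly pos < -len(html_text), where A raises IndexError on its first html_text[pos].
def Pre_read_until_tag (pos : Int) (html_text : String) (tag : String) : Prop :=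
  -(PySem.Str.len html_text) ≤ pos
instance (pos : Int) (html_text : String) (tag : String) : Decidable (Pre_read_until_tag pos html_text tag) := by unfold Pre_read_until_tag; infer_instance

def pvWitness_read_until_tag : Int × String × String := (0, "hi <b>", "t")

-- For -len(html_text) ≤ pos < 0, A's per-index loop reads characters through Python's
-- negative-index wraparound, so its content duplicates end-of-string characters (and it may
-- even break at a negative index), skewing the returned index and tag; B uses the plain slice
-- html_text[pos:stop], the intended reading of "text from pos to the next tag".
def D_read_until_tag (pos : Int) (html_text : String) (tag : String) : Prop := pos < 0
instance (pos : Int) (html_text : String) (tag : String) : Decidable (D_read_until_tag pos html_text tag) := by unfold D_read_until_tag; infer_instance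

def Spec_read_until_tag (pos : Int) (html_text : String) (tag : String) (out : String × Int × String) : Prop := ¬ D_read_until_tag pos html_text tag → out = read_until_tag_alt pos html_text tag
instance (pos : Int) (html_text : String) (tag : String) (out : String × Int × String) : Decidable (Spec_read_until_tag pos html_text tag out) := by unfold Spec_read_until_tag; infer_instance

def pvDiffWitness_read_until_tag : Int × String × String := (-1, "ab", "t")
def pvDiffWitnessOut_read_until_tag : (String × Int × String) × (String × Int × String) :=
  (("ab", 12, "t glyph=bab"), ("ab", 10, "t glyph=b"))

-- ===== CLAIM (what is proved, stated in full; the proofs are below) =====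
def Claim_unchanged_read_until_tag : Prop := ∀ (pos : Int) (html_text : String) (tag : String), Dom_read_until_tag pos html_text tag → Pre_read_until_tag pos html_text tag → Spec_read_until_tag pos html_text tag (read_until_tag pos html_text tag)
def Claim_changed_read_until_tag : Prop := Dom_read_until_tag (pvDiffWitness_read_until_tag.1) (pvDiffWitness_read_until_tag.2.1) (pvDiffWitness_read_until_tag.2.2) ∧ Pre_read_until_tag (pvDiffWitness_read_until_tag.1) (pvDiffWitness_read_until_tag.2.1) (pvDiffWitness_read_until_tag.2.2) ∧ D_read_until_tag (pvDiffWitness_read_until_tag.1) (pvDiffWitness_read_until_tag.2.1) (pvDiffWitness_read_until_tag.2.2) ∧ read_until_tag (pvDiffWitness_read_until_tag.1) (pvDiffWitness_read_until_tag.2.1) (pvDiffWitness_read_until_tag.2.2) = pvDiffWitnessOut_read_until_tag.1 ∧ read_until_tag_alt (pvDiffWitness_read_until_tag.1) (pvDiffWitness_read_until_tag.2.1) (pvDiffWitness_read_until_tag.2.2) = pvDiffWitnessOut_read_until_tag.2 ∧ pvDiffWitnessOut_read_until_tag.1 ≠ pvDiffWitnessOut_read_until_tag.2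

-- ===== LEMMAS AND PROOFS =====

-- "a tag starts at index n" (Nat side)
def tagAt (s : String) (n : Nat) : Bool :=
  match s.toList[n]? with
  | some ch => ch == '<' && pyIsTag (n : Int) s
  | none => false

-- the stopping index both loops reach, defined by A's one-step recursion
def stopN (s : String) (n : Nat) : Nat :=
  if n < s.toList.length then
    if tagAt s n then n else stopN s (n + 1)
  else n
termination_by s.toList.length - n
decreasing_by omega

theorem stopN_ge_len (s : String) (n : Nat) (h : s.toList.length ≤ n) : stopN s n = n := by
  rw [stopN, if_neg (Nat.not_lt.mpr h)]

theorem stopN_ge (s : String) (n : Nat) : n ≤ stopN s n := by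
  induction n using stopN.induct s with
  | case1 n h htag => rw [stopN, if_pos h, if_pos htag]
  | case2 n h htag ih => rw [stopN, if_pos h, if_neg htag]; omega
  | case3 n h => rw [stopN, if_neg h]

theorem stopN_le_len (s : String) (n : Nat) (hn : n ≤ s.toList.length) :
    stopN s n ≤ s.toList.length := by
  induction n using stopN.induct s with
  | case1 n h htag => rw [stopN, if_pos h, if_pos htag]; omega
  | case2 n h htag ih => rw [stopN, if_pos h, if_neg htag]; exact ih h
  | case3 n h => rw [stopN, if_neg h]; omega

theorem stopN_of_tagAt (s : String) (n : Nat) (h : tagAt s n = true) : stopN s n = n := by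
  have hlt : n < s.toList.length := by
    unfold tagAt at h
    rcases hn : s.toList[n]? with _ | ch
    · rw [hn] at h; simp at h
    · exact (List.getElem?_eq_some_iff.mp hn).1
  rw [stopN, if_pos hlt, if_pos h]

theorem stopN_skip (s : String) (n m : Nat) (hnm : n ≤ m) (hm : m ≤ s.toList.length)
    (h : ∀ j, n ≤ j → j < m → tagAt s j = false) : stopN s n = stopN s m := by
  induction n using stopN.induct s with
  | case1 n hlt htag =>
    rcases Nat.eq_or_lt_of_le hnm with rfl | hlt'
    · rfl
    · exact absurd (h n le_rfl hlt') (by simp [htag])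
  | case2 n hlt htag ih =>
    rcases Nat.eq_or_lt_of_le hnm with rfl | hlt'
    · rfl
    · rw [stopN, if_pos hlt, if_neg htag]
      exact ih hlt' (fun j h1 h2 => h j (by omega) h2)
  | case3 n hge =>
    have : n = m := by omega
    rw [this]

-- characters that are not '<' cannot start a tag
theorem tagAt_false_of_ne (s : String) (j : Nat) (hj : j < s.toList.length)
    (h : s.toList[j] ≠ '<') : tagAt s j = false := by
  unfold tagAt
  rw [List.getElem?_eq_getElem hj]
  simp [h]

-- A's loop computes (content = s[n:stopN], stopN)
theorem loopA_eq (s : String) (fuel n : Nat) (c : List Char)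
    (hfuel : stopN s n ≤ n + fuel) :
    pyLoopA s fuel (n : Int) c = (c ++ (s.toList.take (stopN s n)).drop n, ((stopN s n : Nat) : Int)) := by
  induction fuel generalizing n c with
  | zero =>
    have h1 := stopN_ge s n
    have hst : stopN s n = n := by omega
    simp [pyLoopA, hst]
  | succ fuel ih =>
    by_cases hlt : n < s.toList.length
    · have hget : PySem.Str.pyGet? s (n : Int) = some s.toList[n] := by
        rw [PySem.Str.pyGet?_natCast, List.getElem?_eq_getElem hlt]
      by_cases htag : tagAt s n = true
      · have hst := stopN_of_tagAt s n htag
        have hcond : (s.toList[n] == '<' && pyIsTag (n : Int) s) = true := by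
          unfold tagAt at htag
          rwa [List.getElem?_eq_getElem hlt] at htag
        simp only [pyLoopA]
        rw [PySem.Str.len_eq, if_pos (by exact_mod_cast hlt), hget]
        simp [hcond, hst]
      · have hcond : (s.toList[n] == '<' && pyIsTag (n : Int) s) = false := by
          unfold tagAt at htag
          rw [List.getElem?_eq_getElem hlt] at htag
          simpa using htag
        have hst : stopN s n = stopN s (n + 1) := by
          rw [stopN, if_pos hlt, if_neg (by simp [htag])]
        have hrec := ih (n + 1) (c ++ [s.toList[n]]) (by omega)
        simp only [pyLoopA]
        rw [PySem.Str.len_eq, if_pos (by exact_mod_cast hlt), hget]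
        simp only [hcond, Bool.false_eq_true, if_false]
        have harg : ((n : Int) + 1) = ((n + 1 : Nat) : Int) := by push_cast; ring
        rw [harg, hrec, hst]
        have hn1 : n < stopN s (n + 1) := by
          have := stopN_ge s (n + 1); omega
        have hlen : n < (s.toList.take (stopN s (n + 1))).length := by
          rw [List.length_take]; omega
        have hcons : (s.toList.take (stopN s (n + 1))).drop n
            = s.toList[n] :: (s.toList.take (stopN s (n + 1))).drop (n + 1) := by
          rw [List.drop_eq_getElem_cons hlen]
          congr 1
          exact List.getElem_take
        rw [hcons]; simp
    · have hst : stopN s n = n := stopN_ge_len s n (by omega)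
      simp only [pyLoopA]
      rw [PySem.Str.len_eq, if_neg (by exact_mod_cast hlt)]
      simp [hst]

-- B's loop computes the same stop index
theorem findStopB_eq (s : String) (fuel n : Nat) (hfuel : stopN s n ≤ n + fuel) :
    pyFindStopB s fuel (n : Int) = ((stopN s n : Nat) : Int) := by
  induction fuel generalizing n with
  | zero =>
    have h1 := stopN_ge s n
    have hst : stopN s n = n := by omega
    simp [pyFindStopB, hst]
  | succ fuel ih =>
    by_cases hlt : n < s.toList.length
    · have hk : n ≤ s.toList.length := le_of_lt hlt
      have hfind : PySem.Str.findFrom s "<" (n : Int) none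
          = if PySem.Chars.find (s.toList.drop n) ['<'] = -1 then -1
            else (n : Int) + PySem.Chars.find (s.toList.drop n) ['<'] := by
        rw [PySem.Str.findFrom_eq]
        have h := PySem.Chars.findFrom_natCast s.toList "<".toList n hk
        simpa using h
      by_cases hmiss : PySem.Chars.find (s.toList.drop n) ['<'] = -1
      · -- no '<' from n on: both stop at the length
        have hnolt : ∀ j, n ≤ j → (hj : j < s.toList.length) → s.toList[j] ≠ '<' := by
          intro j h1 h2 hc
          have hjn : j - n < (s.toList.drop n).length := by
            rw [List.length_drop]; omega
          have hel : (s.toList.drop n)[j - n]'hjn = s.toList[j]'h2 := by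
            rw [List.getElem_drop]
            congr 1; omega
          have hmem : '<' ∈ s.toList.drop n := by
            rw [← hc, ← hel]; exact List.getElem_mem _
          have hninf : ¬ (['<'] <:+: s.toList.drop n) :=
            (PySem.Chars.find_eq_neg_one_iff _ _).mp hmiss
          exact hninf ((List.singleton_infix_iff _ _).mpr hmem)
        have hst : stopN s n = s.toList.length := by
          rw [stopN_skip s n s.toList.length hk le_rfl
            (fun j h1 h2 => tagAt_false_of_ne s j h2 (hnolt j h1 h2))]
          exact stopN_ge_len s _ le_rfl
        simp only [pyFindStopB]
        rw [PySem.Str.len_eq]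
        rw [if_pos (by exact_mod_cast hlt), hfind]
        simp [hmiss, hst]
      · -- first '<' at index k = n + r
        have hr0 : 0 ≤ PySem.Chars.find (s.toList.drop n) ['<'] := by
          have := PySem.Chars.neg_one_le_find (s.toList.drop n) ['<']
          omega
        obtain ⟨hpre, hmin⟩ := PySem.Chars.find_spec hr0
        set r : Nat := (PySem.Chars.find (s.toList.drop n) ['<']).toNat with hrdef
        set k : Nat := n + r with hkdef
        have hdropk : (s.toList.drop n).drop r = s.toList.drop k := by
          rw [List.drop_drop]
        rw [hdropk] at hpre
        have h0 : s.toList[k]? = some '<' := by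
          rcases hpre with ⟨t, ht⟩
          rw [← List.head?_drop, ← ht]
          rfl
        have hklt : k < s.toList.length := (List.getElem?_eq_some_iff.mp h0).1
        have hkget : s.toList[k]'hklt = '<' := by
          rw [List.getElem?_eq_getElem hklt] at h0
          exact Option.some.inj h0
        have hbefore : ∀ j, n ≤ j → j < k → tagAt s j = false := by
          intro j h1 h2
          apply tagAt_false_of_ne s j (by omega)
          intro hc
          apply hmin (j - n) (by omega)
          have hdj : (s.toList.drop n).drop (j - n) = s.toList.drop j := by
            rw [List.drop_drop]; congr 1; omega
          rw [hdj, List.drop_eq_getElem_cons (by omega : j < s.toList.length), hc]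
          exact ⟨_, rfl⟩
        have hfindval : PySem.Str.findFrom s "<" (n : Int) none = ((k : Nat) : Int) := by
          rw [hfind, if_neg hmiss, hkdef, hrdef]
          push_cast
          omega
        simp only [pyFindStopB]
        rw [PySem.Str.len_eq, if_pos (by exact_mod_cast hlt), hfindval]
        rw [if_neg (by omega)]
        by_cases htag : pyIsTag ((k : Nat) : Int) s = true
        · have htagAt : tagAt s k = true := by
            unfold tagAt
            rw [List.getElem?_eq_getElem hklt, hkget]
            simp [htag]
          have hst : stopN s n = k := by
            rw [stopN_skip s n k (by omega) (by omega) hbefore]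
            exact stopN_of_tagAt s k htagAt
          simp [htag, hst]
        · have htagAt : tagAt s k = false := by
            unfold tagAt
            rw [List.getElem?_eq_getElem hklt]
            simp [htag]
          have hst : stopN s n = stopN s (k + 1) := by
            apply stopN_skip s n (k + 1) (by omega) (by omega)
            intro j h1 h2
            rcases Nat.lt_or_ge j k with hj | hj
            · exact hbefore j h1 hj
            · have hjk : j = k := by omega
              rw [hjk]; exact htagAt
          have harg : ((k : Nat) : Int) + 1 = ((k + 1 : Nat) : Int) := by push_cast; ring
          rw [eq_false_of_ne_true htag]
          simp only [Bool.false_eq_true, if_false]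
          rw [harg, ih (k + 1) (by omega), hst]
    · have hst : stopN s n = n := stopN_ge_len s n (by omega)
      simp only [pyFindStopB]
      rw [PySem.Str.len_eq, if_neg (by exact_mod_cast hlt), hst]

-- ===== VERDICT (by name: the statement is the Claim_ definition above) =====
theorem read_until_tag_spec : Claim_unchanged_read_until_tag := by
  intro pos s tag _ _ hD
  unfold D_read_until_tag at hD
  rw [Int.not_lt] at hD
  obtain ⟨n, rfl⟩ := Int.eq_ofNat_of_zero_le hD
  show read_until_tag (n : Int) s tag = read_until_tag_alt (n : Int) s tag
  have hlen : PySem.Str.len s = (s.toList.length : Int) := PySem.Str.len_eq s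
  have hfuel : stopN s n ≤ n + ((PySem.Str.len s - (n : Int)).toNat + 1) := by
    rcases Nat.le_total n s.toList.length with hc | hc
    · have := stopN_le_len s n hc
      rw [hlen]; omega
    · rw [stopN_ge_len s n hc]; omega
  have hslice : (PySem.Str.slice s (some (n : Int)) (some ((stopN s n : Nat) : Int))).toList
      = (s.toList.take (stopN s n)).drop n := by
    rw [PySem.Str.toList_slice]
    simp only [PySem.Chars.slice_eq_listSlice]
    rw [PySem.List.slice_natCast, List.drop_take]
  unfold read_until_tag read_until_tag_alt
  dsimp only
  rw [loopA_eq s _ n [] hfuel, findStopB_eq s _ n hfuel, hslice]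
  simp

theorem read_until_tag_changed : Claim_changed_read_until_tag := by
  unfold Claim_changed_read_until_tag; decide
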